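-- pv_equiv track=rewrite | github.com/Sensirion/wearable-dev-kit-firmware | scripts/wdk_logdata_driver.py | _size_from_enabled_channels_mask
-- ===== SOURCE A (Python) =====
-- LOG_VALUE_NAMES_AND_TYPES = [
--     # Conversion information of the log values
--     # Tuple with (Value name, unpack type, normalization factor)
--     ("Tup",                       'i', 0.001), # 0
--     ("Hup",                       'i', 0.001), # 1
--     ("Tdwn",                      'i', 0.001), # 2
--     ("Hdwn",                      'i', 0.001), # 3
--     ("Rmox1",                     'i', None),  # 4
--     ("Rmox2",                     'i', None),  # 5
--     ("ReservedSensor1",           'h', None),  # 6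
--     ("ReservedSensor2",           'h', None),  # 7
--     ("ReservedSensor3",           'h', None),  # 8
--     ("ReservedSensor4",           'h', None),  # 9
--     ("ReservedSensor5",           'h', None),  # 10
--     ("ReservedSensor6",           'h', None),  # 11
--     ("ReservedSensor7",           'h', None),  # 12
--     ("ReservedSensor8",           'h', None),  # 13
--     ("ReservedSensor9",           'h', None),  # 14
--     ("ReservedSensor10"           'h', None),  # 15
--
--     # Processed values
--     ("Tskin",                    'f', 1.0),  # 16
--     ("ApparentTemperature",      'f', 1.0),  # 17
--     ("HeatIndex",                'f', 1.0),  # 18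
--     ("Humidex",                  'f', 1.0),  # 19
--     ("CompensationMode",         'B', None), # 20
--     ("Perspiration",             'f', None), # 21
--     ("OnOffBodyState",           'B', 1.0),  # 22
--     ("Reserved0",                'f', None), # 23
--     ("Reserved1",                'B', None), # 24
--     ("Reserved2",                'B', None), # 25
--     ("Reserved3",                'i', None), # 26
--     ("Reserved4",                'i', None), # 27
--     ("Reserved5",                'i', None), # 28
--     ("Reserved6",                'i', None), # 29
--     ("Reserved7",                'i', None), # 30
--     ("Reserved8",                'i', None), # 31
-- ]
--
-- def _size_from_enabled_channels_mask(enabled_channels_mask):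
--     # timestamp is always there
--     log_size = 4
--     for i in range(32):
--         if enabled_channels_mask & (1 << i):
--             if LOG_VALUE_NAMES_AND_TYPES[i][1] in ['i', 'I', 'f']:
--                 log_size += 4
--             elif LOG_VALUE_NAMES_AND_TYPES[i][1] in ['h']:
--                 log_size += 2
--             elif LOG_VALUE_NAMES_AND_TYPES[i][1] in ['B']:
--                 log_size += 1
--             else:
--                 raise IOError("Unsupported log channel")
--     return log_size
-- ===== SOURCE B (Python) =====
-- LOG_VALUE_NAMES_AND_TYPES = [
--     # Conversion information of the log values
--     # Tuple with (Value name, unpack type, normalization factor)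
--     ("Tup",                       'i', 0.001), # 0
--     ("Hup",                       'i', 0.001), # 1
--     ("Tdwn",                      'i', 0.001), # 2
--     ("Hdwn",                      'i', 0.001), # 3
--     ("Rmox1",                     'i', None),  # 4
--     ("Rmox2",                     'i', None),  # 5
--     ("ReservedSensor1",           'h', None),  # 6
--     ("ReservedSensor2",           'h', None),  # 7
--     ("ReservedSensor3",           'h', None),  # 8
--     ("ReservedSensor4",           'h', None),  # 9
--     ("ReservedSensor5",           'h', None),  # 10
--     ("ReservedSensor6",           'h', None),  # 11
--     ("ReservedSensor7",           'h', None),  # 12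
--     ("ReservedSensor8",           'h', None),  # 13
--     ("ReservedSensor9",           'h', None),  # 14
--     ("ReservedSensor10"           'h', None),  # 15
--
--     # Processed values
--     ("Tskin",                    'f', 1.0),  # 16
--     ("ApparentTemperature",      'f', 1.0),  # 17
--     ("HeatIndex",                'f', 1.0),  # 18
--     ("Humidex",                  'f', 1.0),  # 19
--     ("CompensationMode",         'B', None), # 20
--     ("Perspiration",             'f', None), # 21
--     ("OnOffBodyState",           'B', 1.0),  # 22
--     ("Reserved0",                'f', None), # 23
--     ("Reserved1",                'B', None), # 24
--     ("Reserved2",                'B', None), # 25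
--     ("Reserved3",                'i', None), # 26
--     ("Reserved4",                'i', None), # 27
--     ("Reserved5",                'i', None), # 28
--     ("Reserved6",                'i', None), # 29
--     ("Reserved7",                'i', None), # 30
--     ("Reserved8",                'i', None), # 31
-- ]
--
-- # Per-width channel bitmasks, computed once from the table: a channel lands in the
-- # mask of its struct size (4, 2 or 1 byte); channels without a supported type char
-- # land in the "unsupported" mask.
-- _MASK4 = 0
-- _MASK2 = 0
-- _MASK1 = 0
-- _UNSUPPORTED = 0
-- for _i, _entry in enumerate(LOG_VALUE_NAMES_AND_TYPES):
--     _t = _entry[1]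
--     if _t in ('i', 'I', 'f'):
--         _MASK4 |= 1 << _i
--     elif _t == 'h':
--         _MASK2 |= 1 << _i
--     elif _t == 'B':
--         _MASK1 |= 1 << _i
--     else:
--         _UNSUPPORTED |= 1 << _i
--
--
-- def _size_from_enabled_channels_mask(enabled_channels_mask):
--     # timestamp (4 bytes) + popcount of each width class, loop-free
--     if enabled_channels_mask & _UNSUPPORTED:
--         raise IOError("Unsupported log channel")
--     return (4
--             + 4 * bin(enabled_channels_mask & _MASK4).count('1')
--             + 2 * bin(enabled_channels_mask & _MASK2).count('1')
--             + bin(enabled_channels_mask & _MASK1).count('1'))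
-- ===== Notes on version B (the rewrite author's own statement) =====
-- stated objective: alternative
-- what changed: Replaces the 32-iteration loop with per-width if/elif size accumulation by three per-width channel bitmasks precomputed once from the table, so the size is a closed-form expression: 4 + 4*popcount(mask&MASK4) + 2*popcount(mask&MASK2) + popcount(mask&MASK1), with the unsupported-channel check done by a single mask test.
import Mathlib
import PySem

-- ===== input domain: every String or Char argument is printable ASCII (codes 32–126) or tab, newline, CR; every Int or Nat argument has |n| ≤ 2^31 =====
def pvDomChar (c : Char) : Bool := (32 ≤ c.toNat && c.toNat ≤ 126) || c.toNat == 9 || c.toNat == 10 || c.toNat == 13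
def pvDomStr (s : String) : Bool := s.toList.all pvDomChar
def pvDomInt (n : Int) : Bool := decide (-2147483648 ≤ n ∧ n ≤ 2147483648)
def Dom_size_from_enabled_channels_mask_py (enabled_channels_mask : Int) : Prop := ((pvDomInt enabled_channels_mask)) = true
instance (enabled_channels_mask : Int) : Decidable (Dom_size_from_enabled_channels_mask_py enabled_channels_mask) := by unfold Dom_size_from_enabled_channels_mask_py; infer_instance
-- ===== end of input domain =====

-- B replaces A's 32-step loop with three precomputed per-width bitmasks and popcounts (loop-free size computation); equivalence is about the return value on masks with no unsupported channel enabled.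

-- ===== PORT A =====
-- The module constant LOG_VALUE_NAMES_AND_TYPES, restricted to the second component
-- (the struct type char), the only field either function reads (the names and float
-- factors are never used).  Entry 15 of the Python list is the accidentally merged
-- 2-tuple ("ReservedSensor10h", None): its [1] is None, modelled as `none`.
def pvLogTypes : List (Option String) :=
  [some "i", some "i", some "i", some "i", some "i", some "i",
   some "h", some "h", some "h", some "h", some "h", some "h", some "h", some "h", some "h",
   none,
   some "f", some "f", some "f", some "f",
   some "B", some "f", some "B", some "f", some "B", some "B",
   some "i", some "i", some "i", some "i", some "i", some "i"]

-- one iteration of A's loop; acc = none models the raised IOError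
def pvStepA (m : Int) (acc : Option Int) (i : Int) : Option Int :=
  match acc with
  | none => none
  | some log_size =>
    if PySem.Int.band m ((1 : Int) <<< i.toNat) ≠ 0 then
      match PySem.List.pyGet? pvLogTypes i with
      | none => none
      | some t =>
        if [some "i", some "I", some "f"].contains t then some (log_size + 4)
        else if [some "h"].contains t then some (log_size + 2)
        else if [some "B"].contains t then some (log_size + 1)
        else none  -- raise IOError("Unsupported log channel")
  else some log_size

def size_from_enabled_channels_mask_py (enabled_channels_mask : Int) : Int :=
  (((PySem.List.pyRange 0 32 1).foldl (pvStepA enabled_channels_mask) (some 4)).getD 0)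
  -- .getD 0 is junk for the raising runs; Pre_ excludes them

-- ===== PORT B =====
-- module-level mask computation of Source B: (MASK4, MASK2, MASK1, UNSUPPORTED)
def pvMasks : Int × Int × Int × Int :=
  (PySem.List.enumerate pvLogTypes).foldl
    (fun ms p =>
      if [some "i", some "I", some "f"].contains p.2 then
        (PySem.Int.bor ms.1 ((1 : Int) <<< p.1.toNat), ms.2.1, ms.2.2.1, ms.2.2.2)
      else if p.2 == some "h" then
        (ms.1, PySem.Int.bor ms.2.1 ((1 : Int) <<< p.1.toNat), ms.2.2.1, ms.2.2.2)
      else if p.2 == some "B" then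
        (ms.1, ms.2.1, PySem.Int.bor ms.2.2.1 ((1 : Int) <<< p.1.toNat), ms.2.2.2)
      else
        (ms.1, ms.2.1, ms.2.2.1, PySem.Int.bor ms.2.2.2 ((1 : Int) <<< p.1.toNat)))
    (0, 0, 0, 0)

def size_from_enabled_channels_mask_py_alt (enabled_channels_mask : Int) : Int :=
  if PySem.Int.band enabled_channels_mask pvMasks.2.2.2 ≠ 0 then 0  -- raise IOError; excluded by Pre_
  else 4 + 4 * (PySem.Int.bitCount (PySem.Int.band enabled_channels_mask pvMasks.1) : Int)
         + 2 * (PySem.Int.bitCount (PySem.Int.band enabled_channels_mask pvMasks.2.1) : Int)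
         + (PySem.Int.bitCount (PySem.Int.band enabled_channels_mask pvMasks.2.2.1) : Int)

-- ===== PRECONDITION & SPEC =====
-- Pre_ excludes exactly the masks with bit 15 set, on which A raises
-- IOError("Unsupported log channel") (channel 15's table entry has no type char).
def Pre_size_from_enabled_channels_mask_py (enabled_channels_mask : Int) : Prop :=
  PySem.Int.band enabled_channels_mask 32768 = 0
instance (enabled_channels_mask : Int) : Decidable (Pre_size_from_enabled_channels_mask_py enabled_channels_mask) := by unfold Pre_size_from_enabled_channels_mask_py; infer_instance

def pvWitness_size_from_enabled_channels_mask_py : Int := 21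

def Spec_size_from_enabled_channels_mask_py (enabled_channels_mask : Int) (out : Int) : Prop := out = size_from_enabled_channels_mask_py_alt enabled_channels_mask
instance (enabled_channels_mask : Int) (out : Int) : Decidable (Spec_size_from_enabled_channels_mask_py enabled_channels_mask out) := by unfold Spec_size_from_enabled_channels_mask_py; infer_instance

-- ===== CLAIM (what is proved, stated in full; the proofs are below) =====
def Claim_equal_size_from_enabled_channels_mask_py : Prop := ∀ (enabled_channels_mask : Int), Dom_size_from_enabled_channels_mask_py enabled_channels_mask → Pre_size_from_enabled_channels_mask_py enabled_channels_mask → Spec_size_from_enabled_channels_mask_py enabled_channels_mask (size_from_enabled_channels_mask_py enabled_channels_mask)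

-- ===== LEMMAS AND PROOFS =====

theorem pvAndMod (x M : Nat) : (x &&& M) % 2 = (x % 2) * (M % 2) := by
  have h := Nat.testBit_and x M 0
  simp only [Nat.testBit_zero, ← Bool.decide_and, decide_eq_decide] at h
  rcases Nat.mod_two_eq_zero_or_one x with hx|hx <;>
  rcases Nat.mod_two_eq_zero_or_one M with hM|hM <;>
  rcases Nat.mod_two_eq_zero_or_one (x &&& M) with hA|hA <;>
  simp_all
theorem pvNatHalve (x M : Nat) : x &&& M = (x % 2) * (M % 2) + 2 * (x / 2 &&& M / 2) := by
  have h1 := pvAndMod x M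
  have h2 := Nat.and_div_two (a := x) (b := M)
  omega

theorem pvBandHalve (m : Int) (M : Nat) :
    PySem.Int.band m ↑M = PySem.Int.mod m 2 * ↑(M % 2) + 2 * PySem.Int.band (PySem.Int.floordiv m 2) ↑(M / 2) := by
  rw [PySem.Int.floordiv_eq_ediv_of_pos (by norm_num), PySem.Int.mod_eq_emod_of_pos (by norm_num)]
  rcases le_or_gt (0:Int) m with hm | hm
  · have hx : m = ↑m.toNat := (Int.toNat_of_nonneg hm).symm
    rw [PySem.Int.band_of_nonneg hm (by positivity), PySem.Int.band_of_nonneg (by omega) (by positivity)]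
    set x := m.toNat with hxdef
    have h2 : (m / 2).toNat = x / 2 := by omega
    have h3 : m % 2 = ((x % 2 : Nat) : Int) := by omega
    rw [h2, h3]
    simp only [Int.toNat_natCast]
    push_cast
    rw [pvNatHalve x M]
    push_cast
    ring
  · have hk : m = -((-m-1).toNat : Int) - 1 := by omega
    set k := (-m-1).toNat with hkdef
    have hb1 : PySem.Int.band m ↑M = ↑(M - (M &&& k)) := by
      rw [PySem.Int.band]
      rw [if_neg (by omega), if_pos (by positivity)]
      rw [Int.toNat_natCast, ← hkdef]
    have hd : m / 2 = -((k/2 : Nat) : Int) - 1 := by omega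
    have hb2 : PySem.Int.band (m/2) ↑(M/2) = ↑(M/2 - (M/2 &&& (k/2))) := by
      rw [PySem.Int.band]
      rw [if_neg (by omega), if_pos (by positivity)]
      have h6 : (-(m/2)-1).toNat = k/2 := by omega
      rw [Int.toNat_natCast, h6]
    have hmod : m % 2 = 1 - ((k % 2 : Nat) : Int) := by omega
    rw [hb1, hb2, hmod]
    have h1 := pvNatHalve M k
    have h4 : M &&& k ≤ M := Nat.and_le_left
    have h5 : M/2 &&& k/2 ≤ M/2 := Nat.and_le_left
    rcases Nat.mod_two_eq_zero_or_one M with hM|hM <;>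
    rcases Nat.mod_two_eq_zero_or_one k with hK|hK <;>
    simp only [hM, hK] at h1 ⊢ <;> omega

theorem pvBandNonneg (m : Int) (M : Nat) : 0 ≤ PySem.Int.band m ↑M := by
  rw [PySem.Int.band_comm]
  exact PySem.Int.band_nonneg_of_nonneg_left m (by positivity)

theorem pvPcStep (c y : Int) (hc : c = 0 ∨ c = 1) (hy : 0 ≤ y) :
    PySem.Int.bitCount (c + 2 * y) = c.toNat + PySem.Int.bitCount y := by
  by_cases h0 : c + 2 * y = 0
  · have hc0 : c = 0 := by omega
    have hy0 : y = 0 := by omega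
    simp [hc0, hy0]
  · have hpos : 0 < c + 2 * y := by omega
    rw [PySem.Int.bitCount_of_pos hpos]
    have hmod : PySem.Int.mod (c + 2 * y) 2 = c := by
      rw [PySem.Int.mod_eq_emod_of_pos (by norm_num)]; omega
    have hdiv : PySem.Int.floordiv (c + 2 * y) 2 = y := by
      rw [PySem.Int.floordiv_eq_ediv_of_pos (by norm_num)]; omega
    rw [hmod, hdiv]

theorem pvPcHalve (m : Int) (M : Nat) :
    PySem.Int.bitCount (PySem.Int.band m ↑M)
      = (PySem.Int.mod m 2).toNat * (M % 2)
        + PySem.Int.bitCount (PySem.Int.band (PySem.Int.floordiv m 2) ↑(M / 2)) := by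
  have hb := pvBandHalve m M
  have hm01 : PySem.Int.mod m 2 = 0 ∨ PySem.Int.mod m 2 = 1 := by
    have h1 := PySem.Int.mod_nonneg m (b := 2) (by norm_num)
    have h2 := PySem.Int.mod_lt m (b := 2) (by norm_num)
    omega
  have hy := pvBandNonneg (PySem.Int.floordiv m 2) (M / 2)
  rcases Nat.mod_two_eq_zero_or_one M with hM|hM
  · rw [hM] at hb
    simp only [Nat.cast_zero, mul_zero, zero_add] at hb
    have hs := pvPcStep 0 (PySem.Int.band (PySem.Int.floordiv m 2) ↑(M / 2)) (Or.inl rfl) hy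
    simp only [zero_add, Int.toNat_zero] at hs
    rw [hb, hs, hM]
    simp
  · rw [hM] at hb
    simp only [Nat.cast_one, mul_one] at hb
    rw [hb, pvPcStep _ _ hm01 hy, hM]
    rcases hm01 with h|h <;> rw [h] <;> simp


def pvF (m : Int) : Int := PySem.Int.floordiv m 2

def pvBit (m : Int) (i : Nat) : Int := PySem.Int.mod (pvF^[i] m) 2

theorem pvBit01 (m : Int) (i : Nat) : pvBit m i = 0 ∨ pvBit m i = 1 := by
  unfold pvBit
  have h1 := PySem.Int.mod_nonneg (pvF^[i] m) (b := 2) (by norm_num)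
  have h2 := PySem.Int.mod_lt (pvF^[i] m) (b := 2) (by norm_num)
  omega

def pvWsum (m : Int) : Nat → Nat → Nat → Nat → Int
  | 0, _, _, _ => 0
  | fuel + 1, a, b, c =>
      ((4 * (a % 2) + 2 * (b % 2) + c % 2 : Nat) : Int) * PySem.Int.mod m 2
        + pvWsum (pvF m) fuel (a / 2) (b / 2) (c / 2)

theorem pvB_eq_wsum : ∀ (fuel : Nat) (a b c : Nat) (m : Int),
    a < 2 ^ fuel → b < 2 ^ fuel → c < 2 ^ fuel →
    4 * (PySem.Int.bitCount (PySem.Int.band m ↑a) : Int)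
      + 2 * (PySem.Int.bitCount (PySem.Int.band m ↑b) : Int)
      + (PySem.Int.bitCount (PySem.Int.band m ↑c) : Int)
      = pvWsum m fuel a b c := by
  intro fuel
  induction fuel with
  | zero =>
    intro a b c m ha hb hc
    interval_cases a; interval_cases b; interval_cases c
    simp [pvWsum, PySem.Int.band_zero, PySem.Int.bitCount_zero]
  | succ n ih =>
    intro a b c m ha hb hc
    rw [pvPcHalve m a, pvPcHalve m b, pvPcHalve m c]
    have := ih (a / 2) (b / 2) (c / 2) (pvF m) (by omega) (by omega) (by omega)
    rw [pvWsum]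
    rw [← this]
    unfold pvF
    have hm01 : PySem.Int.mod m 2 = 0 ∨ PySem.Int.mod m 2 = 1 := by
      have h1 := PySem.Int.mod_nonneg m (b := 2) (by norm_num)
      have h2 := PySem.Int.mod_lt m (b := 2) (by norm_num)
      omega
    rcases hm01 with h|h <;> rw [h] <;> push_cast [h] <;> ring

theorem pvShift (i : Nat) : ((1 : Int) <<< i) = ((2 ^ i : Nat) : Int) := by
  rw [Int.shiftLeft_eq]
  push_cast
  ring

theorem pvBandPow (i : Nat) (m : Int) :
    PySem.Int.band m ((2 ^ i : Nat) : Int) = ((2 ^ i : Nat) : Int) * pvBit m i := by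
  induction i generalizing m with
  | zero =>
    simp [pvBit, PySem.Int.band_one]
  | succ n ih =>
    have hb := pvBandHalve m (2 ^ (n + 1))
    have h1 : 2 ^ (n + 1) % 2 = 0 := by
      simp [Nat.pow_succ]
    have h2 : 2 ^ (n + 1) / 2 = 2 ^ n := by
      rw [Nat.pow_succ, Nat.mul_div_cancel]; norm_num
    rw [h1, h2] at hb
    rw [hb, ih (PySem.Int.floordiv m 2)]
    have h3 : pvBit (PySem.Int.floordiv m 2) n = pvBit m (n + 1) := by
      unfold pvBit
      rw [Function.iterate_succ_apply]
      rfl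
    rw [h3]
    push_cast [Nat.pow_succ]
    ring

theorem pvWsum_eq_sum (fuel : Nat) : ∀ (a b c : Nat) (m : Int),
    pvWsum m fuel a b c
      = ((List.range fuel).map (fun i =>
          ((4 * (a / 2 ^ i % 2) + 2 * (b / 2 ^ i % 2) + c / 2 ^ i % 2 : Nat) : Int) * pvBit m i)).sum := by
  induction fuel with
  | zero => intro a b c m; simp [pvWsum]
  | succ n ih =>
    intro a b c m
    rw [pvWsum, ih]
    rw [List.range_succ_eq_map]
    simp only [List.map_cons, List.sum_cons, List.map_map]
    congr 1
    · simp [pvBit]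
    · refine congrArg List.sum (List.map_congr_left (fun i _ => ?_))
      simp only [Function.comp_apply]
      have hd : ∀ x : Nat, x / 2 / 2 ^ i = x / 2 ^ (i + 1) := by
        intro x
        rw [Nat.div_div_eq_div_mul, ← pow_succ']
      have hbit : pvBit (pvF m) i = pvBit m (i + 1) := by
        unfold pvBit
        rw [Function.iterate_succ_apply]
      rw [hd, hd, hd, hbit]

def pvW : List Int := [4,4,4,4,4,4, 2,2,2,2,2,2,2,2,2, 0, 4,4,4,4, 1, 4, 1, 4, 1, 1, 4,4,4,4,4,4]

theorem pvStepA_eval (m : Int) (hm : PySem.Int.band m 32768 = 0) (i : Int)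
    (h0 : 0 ≤ i) (h32 : i < 32) (s : Int) :
    pvStepA m (some s) i = some (s + pvW.getD i.toNat 0 * pvBit m i.toNat) := by
  have hm' : ((2 ^ 15 : Nat) : Int) * pvBit m 15 = 0 := by
    rw [← pvBandPow 15 m]
    norm_num
    exact hm
  rcases pvBit01 m i.toNat with h|h <;>
    interval_cases i <;>
    simp only [pvStepA] <;>
    rw [show ∀ k : Nat, ((1:Int) <<< k) = ((2 ^ k : Nat) : Int) from pvShift] <;>
    rw [pvBandPow] <;>
    (try simp only [Int.reduceToNat] at h) <;>
    (try (rw [h] at hm'; norm_num at hm')) <;>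
    simp [h, pvLogTypes, PySem.List.pyGet?, PySem.List.pyIdx?, pvW]

theorem pvFoldA (m : Int) (hm : PySem.Int.band m 32768 = 0) :
    ∀ l : List Int, (∀ i ∈ l, 0 ≤ i ∧ i < 32) → ∀ s : Int,
      l.foldl (pvStepA m) (some s)
        = some (s + (l.map (fun i => pvW.getD i.toNat 0 * pvBit m i.toNat)).sum) := by
  intro l
  induction l with
  | nil => intro _ s; simp
  | cons i t ih =>
    intro hmem s
    rw [List.foldl_cons, pvStepA_eval m hm i (hmem i (by simp)).1 (hmem i (by simp)).2,
        ih (fun j hj => hmem j (by simp [hj]))]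
    simp [add_assoc]

theorem pvMain (m : Int) (hm : PySem.Int.band m 32768 = 0) :
    size_from_enabled_channels_mask_py m = size_from_enabled_channels_mask_py_alt m := by
  have hmask : pvMasks = (4239327295, 32704, 55574528, 32768) := by decide
  have hrange : PySem.List.pyRange 0 32 1 =
      [0,1,2,3,4,5,6,7,8,9,10,11,12,13,14,15,16,17,18,19,20,21,22,23,24,25,26,27,28,29,30,31] := by decide
  rw [size_from_enabled_channels_mask_py, size_from_enabled_channels_mask_py_alt, hmask, hrange]
  rw [pvFoldA m hm _ (by decide), Option.getD_some]
  rw [if_neg (by simpa using hm)]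
  have hB := pvB_eq_wsum 32 4239327295 32704 55574528 m (by norm_num) (by norm_num) (by norm_num)
  have hW := pvWsum_eq_sum 32 4239327295 32704 55574528 m
  rw [show List.range 32 = [0,1,2,3,4,5,6,7,8,9,10,11,12,13,14,15,16,17,18,19,20,21,22,23,24,25,26,27,28,29,30,31] from rfl] at hW
  have hBW := hB.trans hW
  simp only [List.map_cons, List.map_nil, List.sum_cons, List.sum_nil] at hBW ⊢
  simp only [Int.reduceToNat] at ⊢ hBW
  norm_num [pvW, List.getD] at hBW ⊢
  omega

-- ===== VERDICT (by name: the statement is the Claim_ definition above) =====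
theorem size_from_enabled_channels_mask_py_spec : Claim_equal_size_from_enabled_channels_mask_py := by
  intro m _ hpre
  unfold Spec_size_from_enabled_channels_mask_py
  exact pvMain m hpre
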